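-- pv_equiv track=rewrite | github.com/RY0M4/coding-challenges | codewars/catching_car_mileage_numbers.py | is_decremental_sequence
-- ===== SOURCE A (Python) =====
-- def is_decremental_sequence(n):
--     if len(n) < 3:
--         return False
--     for i in range(len(n)):
--         if i != len(n) - 1:
--             if int(n[i + 1]) != int(n[i]) - 1:
--                 return False
--     return True
-- ===== SOURCE B (Python) =====
-- def is_decremental_sequence(n):
--     if len(n) < 3:
--         return False
--     d = [int(c) for c in n]
--     return d == [d[0] - i for i in range(len(d))]
-- ===== Notes on version B (the rewrite author's own statement) =====
-- stated objective: simpler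
-- what changed: Instead of A's index loop testing each adjacent pair int(n[i+1]) == int(n[i])-1 with an i != len-1 guard, B converts the whole string to a digit list once and compares it against the expected descending arithmetic sequence generated from the first digit.
-- outside the precondition, e.g. on is_decremental_sequence('19x'): A returns False, B raises ValueError
import Mathlib
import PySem

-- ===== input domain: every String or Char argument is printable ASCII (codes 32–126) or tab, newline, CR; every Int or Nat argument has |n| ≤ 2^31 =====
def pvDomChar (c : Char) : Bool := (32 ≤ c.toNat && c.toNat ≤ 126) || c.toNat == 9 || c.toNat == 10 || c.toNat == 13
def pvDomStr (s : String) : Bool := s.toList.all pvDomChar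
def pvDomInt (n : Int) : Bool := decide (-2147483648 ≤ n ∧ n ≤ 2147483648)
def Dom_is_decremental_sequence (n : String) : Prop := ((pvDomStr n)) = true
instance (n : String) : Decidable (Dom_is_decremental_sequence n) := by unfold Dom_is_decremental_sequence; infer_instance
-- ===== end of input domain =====

-- B replaces A's adjacent-pair index loop by converting the string to a digit list once
-- and comparing it to the expected descending sequence generated from the first digit (simpler).


-- int(c) for a one-character string c (ValueError = none)
def pvDigit? (c : Char) : Option Int := PySem.Int.ofStr? (String.ofList [c])

-- ===== PORT A =====
-- the 'for i in range(len(n))' loop; the 'match' nones are IndexError/ValueError (excluded by Pre_)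
def pvALoop (s : List Char) (L : Int) : List Int → Bool
  | [] => true
  | i :: rest =>
    if i ≠ L - 1 then
      match (PySem.List.pyGet? s (i + 1)).bind pvDigit?, (PySem.List.pyGet? s i).bind pvDigit? with
      | some x, some y => if x ≠ y - 1 then false else pvALoop s L rest
      | _, _ => false
    else pvALoop s L rest

def is_decremental_sequence (n : String) : Bool :=
  if n.toList.length < 3 then false
  else pvALoop n.toList (n.toList.length : Int) (PySem.List.pyRange 0 (n.toList.length : Int) 1)

-- ===== PORT B =====
-- [int(c) for c in n]; none = ValueError (excluded by Pre_)
def pvDigits? : List Char → Option (List Int)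
  | [] => some []
  | c :: cs =>
    match pvDigit? c, pvDigits? cs with
    | some d, some ds => some (d :: ds)
    | _, _ => none

def is_decremental_sequence_alt (n : String) : Bool :=
  if n.toList.length < 3 then false
  else
    match pvDigits? n.toList with
    | none => false        -- ValueError, excluded by Pre_
    | some [] => false     -- unreachable: length ≥ 3
    | some (d0 :: ds) =>
      (d0 :: ds) == (PySem.List.pyRange 0 (((d0 :: ds).length : Nat) : Int) 1).map (fun i => d0 - i)

-- ===== PRECONDITION & SPEC =====
-- Pre_ excludes strings of length ≥ 3 containing a non-digit character: there A either raises
-- ValueError itself or returns False by an early adjacent-pair mismatch, while B (which converts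
-- the whole string first) raises ValueError.
def Pre_is_decremental_sequence (n : String) : Prop :=
  PySem.Str.len n < 3 ∨ PySem.Str.strIsdigit n = true
instance (n : String) : Decidable (Pre_is_decremental_sequence n) := by
  unfold Pre_is_decremental_sequence; infer_instance

def pvWitness_is_decremental_sequence : String := "543"

def Spec_is_decremental_sequence (n : String) (out : Bool) : Prop := out = is_decremental_sequence_alt n
instance (n : String) (out : Bool) : Decidable (Spec_is_decremental_sequence n out) := by unfold Spec_is_decremental_sequence; infer_instance

-- ===== CLAIM (what is proved, stated in full; the proofs are below) =====
def Claim_equal_is_decremental_sequence : Prop := ∀ (n : String), Dom_is_decremental_sequence n → Pre_is_decremental_sequence n → Spec_is_decremental_sequence n (is_decremental_sequence n)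

-- ===== LEMMAS AND PROOFS =====

-- digit value of a digit character
def pvVal (c : Char) : Int := (c.toNat : Int) - 48

theorem pvDigit_mem (c : Char) (h : ('0' ≤ c && c ≤ '9') = true) :
    c ∈ ['0','1','2','3','4','5','6','7','8','9'] := by
  simp only [Bool.and_eq_true, decide_eq_true_eq] at h
  obtain ⟨h1, h2⟩ := h
  have hofn := Char.ofNat_toNat c
  set m := c.toNat with hm
  have h1' : 48 ≤ m := h1
  have h2' : m ≤ 57 := h2
  clear_value m
  interval_cases m <;> rw [← hofn] <;> decide

-- the common chain predicate both ports reduce to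
def pvChain : Int → List Int → Bool
  | _, [] => true
  | a, b :: t => (b == a - 1) && pvChain b t

theorem pvDigit?_of_digit (c : Char) (h : c ∈ ['0','1','2','3','4','5','6','7','8','9']) :
    pvDigit? c = some (pvVal c) := by
  fin_cases h <;> decide

theorem pvDigits?_of_digits (s : List Char) (h : ∀ c ∈ s, c ∈ ['0','1','2','3','4','5','6','7','8','9']) :
    pvDigits? s = some (s.map pvVal) := by
  induction s with
  | nil => rfl
  | cons c cs ih =>
    simp only [pvDigits?, pvDigit?_of_digit c (h c (by simp)), ih (fun x hx => h x (by simp [hx]))]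
    rfl

theorem pvB_aux_map (a : Int) (L : List Nat) :
    List.map ((fun k : Nat => a - 1 - (k : Int)) ∘ Nat.succ) L
      = L.map (fun k : Nat => (a - 1) - 1 - (k : Int)) := by
  apply List.map_congr_left; intro k _
  simp only [Function.comp_apply]; push_cast; ring

theorem pvExp_eq_chain (t : List Int) : ∀ (a : Int),
    (t = (List.range t.length).map (fun k : Nat => a - 1 - (k : Int))) ↔ pvChain a t = true := by
  induction t with
  | nil => intro a; simp [pvChain]
  | cons b t' ih =>
    intro a
    rw [List.length_cons, List.range_succ_eq_map]
    simp only [List.map_cons, List.map_map, List.cons.injEq, Nat.cast_zero, sub_zero]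
    rw [pvB_aux_map]
    constructor
    · rintro ⟨rfl, ht⟩
      simp [pvChain, (ih (a - 1)).mp ht]
    · intro hc
      simp only [pvChain, Bool.and_eq_true, beq_iff_eq] at hc
      obtain ⟨rfl, hc2⟩ := hc
      exact ⟨rfl, (ih (a - 1)).mpr hc2⟩

theorem pvB_eq_chain (a : Int) (ts : List Int) :
    ((a :: ts) == ((List.range (ts.length + 1)).map (fun k : Nat => a - (k : Int)))) = pvChain a ts := by
  rw [List.range_succ_eq_map]
  simp only [List.map_cons, List.map_map, Nat.cast_zero, sub_zero]
  have hmap : List.map ((fun k : Nat => a - (k : Int)) ∘ Nat.succ) (List.range ts.length)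
      = (List.range ts.length).map (fun k : Nat => a - 1 - (k : Int)) := by
    apply List.map_congr_left; intro k _
    simp only [Function.comp_apply]; push_cast; ring
  rw [hmap]
  by_cases h : ts = (List.range ts.length).map (fun k : Nat => a - 1 - (k : Int))
  · rw [(pvExp_eq_chain ts a).mp h, ← h]; simp
  · have hf : pvChain a ts = false := by
      cases h' : pvChain a ts
      · rfl
      · exact absurd ((pvExp_eq_chain ts a).mpr h') h
    rw [hf]
    simp only [beq_eq_false_iff_ne, ne_eq, List.cons.injEq, not_and]
    intro _ h2; exact h h2

theorem pvALoop_eq_chain (s : List Char)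
    (hd : ∀ c ∈ s, c ∈ ['0','1','2','3','4','5','6','7','8','9']) :
    ∀ (m j : Nat), j + m = s.length → 1 ≤ m →
    pvALoop s (s.length : Int) (PySem.List.pyRange (j : Int) (s.length : Int) 1) =
      pvChain (pvVal (s.getD j '0')) ((s.drop (j + 1)).map pvVal) := by
  intro m
  induction m with
  | zero => intro j _ h1; omega
  | succ m' ih =>
    intro j hj _
    have hjlt : j < s.length := by omega
    rw [PySem.List.pyRange_one_cons (by exact_mod_cast hjlt)]
    by_cases hm : m' = 0
    · -- last index: i = len - 1, the guard skips, loop ends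
      subst hm
      have hj1 : j + 1 = s.length := by omega
      have : PySem.List.pyRange ((j : Int) + 1) (s.length : Int) 1 = [] := by
        apply PySem.List.pyRange_one_eq_nil; exact_mod_cast (le_of_eq hj1.symm)
      rw [this]
      simp only [pvALoop]
      rw [if_neg (by omega)]
      rw [show s.drop (j + 1) = [] from List.drop_eq_nil_of_le (by omega)]
      rfl
    · have hj1lt : j + 1 < s.length := by omega
      simp only [pvALoop]
      rw [if_pos (by omega)]
      have hg1 : PySem.List.pyGet? s ((j : Int) + 1) = some s[j + 1] := by
        rw [show ((j : Int) + 1) = ((j + 1 : Nat) : Int) by push_cast; ring,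
            PySem.List.pyGet?_natCast]
        simp [List.getElem?_eq_getElem hj1lt]
      have hg0 : PySem.List.pyGet? s ((j : Int)) = some s[j] := by
        rw [PySem.List.pyGet?_natCast]; simp [List.getElem?_eq_getElem hjlt]
      rw [hg1, hg0]
      simp only [Option.bind_some]
      rw [pvDigit?_of_digit _ (hd _ (s.getElem_mem hj1lt)),
          pvDigit?_of_digit _ (hd _ (s.getElem_mem hjlt))]
      have hrec := ih (j + 1) (by omega) (by omega)
      rw [show ((j : Int) + 1) = ((j + 1 : Nat) : Int) by push_cast; ring, hrec]
      rw [List.drop_eq_getElem_cons hj1lt]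
      simp only [List.map_cons]
      rw [show pvChain (pvVal (s.getD j '0')) (pvVal s[j + 1] :: (s.drop (j + 1 + 1)).map pvVal)
            = ((pvVal s[j + 1] == pvVal (s.getD j '0') - 1) &&
               pvChain (pvVal s[j + 1]) ((s.drop (j + 1 + 1)).map pvVal)) from rfl]
      rw [List.getD_eq_getElem s '0' hjlt, List.getD_eq_getElem s '0' hj1lt]
      by_cases hx : pvVal s[j + 1] = pvVal s[j] - 1
      · rw [if_neg (by simpa using hx)]; simp [hx]
      · rw [if_pos (by simpa using hx)]; simp [hx]

-- ===== VERDICT (by name: the statement is the Claim_ definition above) =====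
theorem is_decremental_sequence_spec : Claim_equal_is_decremental_sequence := by
  intro n _ hpre
  unfold Spec_is_decremental_sequence is_decremental_sequence is_decremental_sequence_alt
  by_cases hlen : n.toList.length < 3
  · rw [if_pos hlen, if_pos hlen]
  · rw [if_neg hlen, if_neg hlen]
    rcases hpre with h | hall
    · rw [PySem.Str.len_eq] at h
      exact absurd (by exact_mod_cast h) hlen
    · rw [PySem.Str.strIsdigit_eq] at hall
      simp only [PySem.Chars.strIsdigit, Bool.and_eq_true, List.all_eq_true] at hall
      have hd : ∀ c ∈ n.toList, c ∈ ['0','1','2','3','4','5','6','7','8','9'] := by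
        intro c hc
        exact pvDigit_mem c (hall.2 c hc)
      rw [pvDigits?_of_digits _ hd]
      obtain ⟨c, t, hs⟩ : ∃ c t, n.toList = c :: t := by
        cases h : n.toList with
        | nil => rw [h] at hlen; simp at hlen
        | cons c t => exact ⟨c, t, rfl⟩
      rw [hs] at hd ⊢
      simp only [List.map_cons]
      -- A side reduces to the chain predicate
      have hA := pvALoop_eq_chain (c :: t) hd (c :: t).length 0 (by simp) (by simp)
      rw [show ((0 : Nat) : Int) = (0 : Int) from rfl] at hA
      rw [hA]
      simp only [List.getD, List.getElem?_cons_zero, Option.getD_some, List.drop_succ_cons,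
        List.drop_zero]
      -- B side reduces to the same chain predicate
      rw [show ((pvVal c :: t.map pvVal).length : Int) = ((t.length + 1 : Nat) : Int) by simp]
      rw [PySem.List.pyRange_zero_natCast, List.map_map]
      rw [show ((fun i => pvVal c - i) ∘ (fun k : Nat => (k : Int)))
            = (fun k : Nat => pvVal c - (k : Int)) from rfl]
      rw [show t.length = (t.map pvVal).length by simp]
      rw [pvB_eq_chain (pvVal c) (t.map pvVal)]
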